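-- pv_equiv track=rewrite | github.com/JorgesJ/iptv_panel | app.py | aplicar_filtro
-- ===== SOURCE A (Python) =====
-- import unicodedata
--
-- def normalizar(texto: str) -> str:
--     return ''.join(
--         c for c in unicodedata.normalize('NFD', texto.upper())
--         if unicodedata.category(c) != 'Mn'
--     )
--
-- def aplicar_filtro(canales, filtro):
--     # Sin filtro o comodín = devolver todos
--     if not filtro or not filtro.strip() or filtro.strip() == '*':
--         return canales
--     filtros = [normalizar(f.strip()) for f in filtro.split(',') if f.strip()]
--     if not filtros:
--         return canales
--     def coincide(nombre):
--         n = normalizar(nombre)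
--         for f in filtros:
--             if n.startswith(f):
--                 return True
--             if f in n:
--                 return True
--         return False
--     return [c for c in canales if coincide(c["nombre"])]
-- ===== SOURCE B (Python) =====
-- import unicodedata
--
-- def normalizar(texto: str) -> str:
--     return ''.join(
--         c for c in unicodedata.normalize('NFD', texto.upper())
--         if unicodedata.category(c) != 'Mn'
--     )
--
-- def aplicar_filtro(canales, filtro):
--     clave = filtro.strip()
--     if clave in ('', '*'):
--         return canales
--     filtros = [normalizar(p.strip()) for p in filtro.split(',') if p.strip()]
--     if not filtros:
--         return canales
--     # Index the (non-empty) filters by their first character: a single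
--     # left-to-right scan of each name then only tests, at each position,
--     # the filters that could start there, instead of one full substring
--     # search per filter.
--     por_inicial = {}
--     for f in filtros:
--         por_inicial.setdefault(f[0], []).append(f)
--     def coincide(nombre):
--         n = normalizar(nombre)
--         for i, ch in enumerate(n):
--             if any(n.startswith(f, i) for f in por_inicial.get(ch, ())):
--                 return True
--         return False
--     return [c for c in canales if coincide(c['nombre'])]
-- ===== Notes on version B (the rewrite author's own statement) =====
-- stated objective: alternative
-- what changed: Replaces A's per-filter substring searches (startswith then 'in' for each filter, per name) by a first-character hash index over the filters and a single left-to-right position scan of each normalized name that only tests the filters bucketed under the current character; the prefix check is subsumed by the position-0 case of the scan.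
import Mathlib
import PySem

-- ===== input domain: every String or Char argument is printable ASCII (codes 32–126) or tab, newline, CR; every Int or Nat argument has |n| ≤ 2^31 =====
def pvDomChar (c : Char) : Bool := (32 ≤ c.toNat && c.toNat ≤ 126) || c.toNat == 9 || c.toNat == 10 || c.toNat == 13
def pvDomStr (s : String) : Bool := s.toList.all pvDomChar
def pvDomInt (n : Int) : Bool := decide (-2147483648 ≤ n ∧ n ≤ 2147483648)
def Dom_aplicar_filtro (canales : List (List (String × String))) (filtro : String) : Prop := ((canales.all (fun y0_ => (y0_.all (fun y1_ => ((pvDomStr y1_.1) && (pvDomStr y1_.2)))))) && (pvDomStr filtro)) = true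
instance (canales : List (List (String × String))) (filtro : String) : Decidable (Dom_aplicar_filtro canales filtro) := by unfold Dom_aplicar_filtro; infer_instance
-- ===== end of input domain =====

-- B replaces A's per-filter substring searches by a first-character index over the filters
-- and one position scan per normalized name; objective: alternative (return value only; no mutation).


-- ===== PORT A =====
-- filtro.split(',') — sep is non-empty so Str.split? is always 'some'; getD [] never fires.
def pvSplitComma (s : String) : List String := (PySem.Str.split? s ",").getD []

-- normalizar: on the printable-ASCII domain NFD is the identity and no char has category 'Mn',
-- so normalizar(texto) = texto.upper() exactly; ported as PySem.Str.upper (exact on the stated ASCII domain).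
def pvNormalizar (s : String) : String := PySem.Str.upper s

-- c["nombre"] with first-match dict lookup; the KeyError case (key absent) is excluded by Pre_,
-- where the total form getD is used with an irrelevant default.
def pvNombre (c : List (String × String)) : String := PySem.Dict.getD ⟨c⟩ "nombre" ""

-- A's inner 'coincide' loop: for f in filtros: startswith, then 'in', early returns.
def pvCoincide (n : String) : List String → Bool
  | [] => false
  | f :: rest =>
    if PySem.Str.startswith n f then true
    else if PySem.Str.isIn f n then true
    else pvCoincide n rest

def aplicar_filtro (canales : List (List (String × String))) (filtro : String) : List (List (String × String)) :=
  if filtro = "" ∨ PySem.Str.strip filtro = "" ∨ PySem.Str.strip filtro = "*" then canales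
  else
    let filtros := ((pvSplitComma filtro).filter (fun p => PySem.Str.strip p ≠ "")).map
      (fun p => pvNormalizar (PySem.Str.strip p))
    if filtros = [] then canales
    else canales.filter (fun c => pvCoincide (pvNormalizar (pvNombre c)) filtros)

-- ===== PORT B =====
-- the index-building loop: por_inicial.setdefault(f[0], []).append(f).
-- Every f here is non-empty (f = normalizar(p.strip()) with p.strip() truthy), so f[0] never
-- raises; the 'none' head? branch is unreachable and leaves the dict unchanged.
def pvIndex (fs : List String) : PySem.Dict Char (List String) :=
  fs.foldl (fun d f =>
    match f.toList.head? with
    | some c => d.insert c (d.getD c [] ++ [f])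
    | none => d) ⟨[]⟩

-- B's coincide: for i, ch in enumerate(n): test only the filters bucketed under ch with
-- n.startswith(f, i) — ported as recursion over the suffixes of the name.
def pvCoincideB (idx : PySem.Dict Char (List String)) : List Char → Bool
  | [] => false
  | ch :: rest =>
    if (idx.getD ch []).any (fun f => f.toList.isPrefixOf (ch :: rest)) then true
    else pvCoincideB idx rest

def aplicar_filtro_alt (canales : List (List (String × String))) (filtro : String) : List (List (String × String)) :=
  let clave := PySem.Str.strip filtro
  if clave = "" ∨ clave = "*" then canales
  else
    let filtros := ((pvSplitComma filtro).filter (fun p => PySem.Str.strip p ≠ "")).map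
      (fun p => pvNormalizar (PySem.Str.strip p))
    if filtros = [] then canales
    else
      let idx := pvIndex filtros
      canales.filter (fun c => pvCoincideB idx (pvNormalizar (pvNombre c)).toList)

-- ===== PRECONDITION & SPEC =====
-- Pre_ excludes exactly the inputs on which Python A raises KeyError: a non-trivial filter
-- together with some channel dict lacking the key "nombre" (B raises there too).
def Pre_aplicar_filtro (canales : List (List (String × String))) (filtro : String) : Prop :=
  (PySem.Str.strip filtro = "" ∨ PySem.Str.strip filtro = "*"
    ∨ (pvSplitComma filtro).all (fun p => PySem.Str.strip p = ""))
  ∨ ∀ c ∈ canales, (PySem.Dict.get? (⟨c⟩ : PySem.Dict String String) "nombre").isSome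
instance (canales : List (List (String × String))) (filtro : String) : Decidable (Pre_aplicar_filtro canales filtro) := by unfold Pre_aplicar_filtro; infer_instance

def pvWitness_aplicar_filtro : (List (List (String × String))) × String :=
  ([[("nombre", "HBO Max"), ("url", "x")], [("nombre", "cnn")]], " hbo , zz ")

def Spec_aplicar_filtro (canales : List (List (String × String))) (filtro : String) (out : List (List (String × String))) : Prop := out = aplicar_filtro_alt canales filtro
instance (canales : List (List (String × String))) (filtro : String) (out : List (List (String × String))) : Decidable (Spec_aplicar_filtro canales filtro out) := by unfold Spec_aplicar_filtro; infer_instance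

-- ===== CLAIM (what is proved, stated in full; the proofs are below) =====
def Claim_equal_aplicar_filtro : Prop := ∀ (canales : List (List (String × String))) (filtro : String), Dom_aplicar_filtro canales filtro → Pre_aplicar_filtro canales filtro → Spec_aplicar_filtro canales filtro (aplicar_filtro canales filtro)

-- ===== LEMMAS AND PROOFS =====

-- the guard "filtro empty or strip empty or strip = '*'" collapses to "strip ∈ {'', '*'}"
theorem pvGuard_iff (filtro : String) :
    (filtro = "" ∨ PySem.Str.strip filtro = "" ∨ PySem.Str.strip filtro = "*")
      ↔ (PySem.Str.strip filtro = "" ∨ PySem.Str.strip filtro = "*") := by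
  constructor
  · rintro (rfl | h | h)
    · exact Or.inl (by decide)
    · exact Or.inl h
    · exact Or.inr h
  · rintro (h | h)
    · exact Or.inr (Or.inl h)
    · exact Or.inr (Or.inr h)

-- A's coincide loop computes "some filter is a substring" (prefix match implies substring match).
theorem pvCoincide_eq_any (n : String) (fs : List String) :
    pvCoincide n fs = fs.any (fun f => decide (f.toList <:+: n.toList)) := by
  induction fs with
  | nil => rfl
  | cons f rest ih =>
    simp only [List.any_cons]
    by_cases h2 : f.toList <:+: n.toList
    · have hIn : PySem.Str.isIn f n = true := (PySem.Str.isIn_iff_infix f n).2 h2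
      have hc : pvCoincide n (f :: rest) = true := by
        unfold pvCoincide
        by_cases h1 : PySem.Str.startswith n f = true
        · rw [if_pos h1]
        · rw [if_neg h1, if_pos hIn]
      rw [hc, decide_eq_true h2, Bool.true_or]
    · have hIn : PySem.Str.isIn f n = false := by
        rw [← Bool.not_eq_true]; intro h; exact h2 ((PySem.Str.isIn_iff_infix f n).1 h)
      have h1 : PySem.Str.startswith n f = false := by
        rw [← Bool.not_eq_true]; intro h
        exact h2 ((PySem.Chars.startswith_iff n.toList f.toList).1 (by simpa using h)).isInfix
      unfold pvCoincide
      rw [if_neg (by rw [h1]; simp), if_neg (by rw [hIn]; simp), ih, decide_eq_false h2,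
        Bool.false_or]

-- the bucket of character c in the index holds exactly the filters whose first char is c, in order
theorem pvIndex_getD (fs : List String) (c : Char) :
    (pvIndex fs).getD c [] = fs.filter (fun f => f.toList.head? = some c) := by
  suffices h : ∀ (d : PySem.Dict Char (List String)),
      (fs.foldl (fun d f =>
        match f.toList.head? with
        | some c => d.insert c (d.getD c [] ++ [f])
        | none => d) d).getD c []
      = d.getD c [] ++ fs.filter (fun f => f.toList.head? = some c) by
    have := h ⟨[]⟩
    simpa [pvIndex, PySem.Dict.getD, PySem.Dict.get?] using this
  induction fs with
  | nil => intro d; simp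
  | cons f rest ih =>
    intro d
    cases hf : f.toList.head? with
    | none => simp [List.foldl_cons, hf, ih]
    | some c0 =>
      by_cases hc : c0 = c
      · subst hc
        simp [List.foldl_cons, hf, ih]
      · simp [List.foldl_cons, hf, ih, PySem.Dict.getD_insert, Ne.symm hc, hc]

-- at a given suffix ch :: rest, testing only the bucket of ch equals testing all (non-empty) filters
theorem pvBucket_any (fs : List String) (ch : Char) (rest : List Char)
    (hne : ∀ f ∈ fs, f.toList ≠ []) :
    ((pvIndex fs).getD ch []).any (fun f => f.toList.isPrefixOf (ch :: rest))
      = fs.any (fun f => f.toList.isPrefixOf (ch :: rest)) := by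
  rw [pvIndex_getD, List.any_filter]
  rw [Bool.eq_iff_iff]
  simp only [List.any_eq_true]
  constructor
  · rintro ⟨f, hf, h⟩
    simp only [Bool.and_eq_true] at h
    exact ⟨f, hf, h.2⟩
  · rintro ⟨f, hf, h⟩
    refine ⟨f, hf, ?_⟩
    cases hft : f.toList with
    | nil => exact absurd hft (hne f hf)
    | cons c0 t =>
      have hpre : (c0 :: t) <+: (ch :: rest) := by
        rw [hft] at h; exact List.isPrefixOf_iff_prefix.1 h
      have hc : c0 = ch := (List.cons_prefix_cons.1 hpre).1
      subst hc
      have h' : f.toList.isPrefixOf (c0 :: rest) = true := h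
      rw [hft] at h'
      simp [h']

-- B's coincide scan equals "some filter is a substring", for non-empty filters
theorem pvCoincideB_eq_any (fs : List String) (hne : ∀ f ∈ fs, f.toList ≠ []) (n : List Char) :
    pvCoincideB (pvIndex fs) n = fs.any (fun f => decide (f.toList <:+: n)) := by
  induction n with
  | nil =>
    simp only [pvCoincideB]
    symm
    rw [List.any_eq_false]
    intro f hf
    simp only [decide_eq_true_eq, List.infix_nil]
    exact hne f hf
  | cons ch rest ih =>
    simp only [pvCoincideB, pvBucket_any fs ch rest hne]
    by_cases hb : fs.any (fun f => f.toList.isPrefixOf (ch :: rest)) = true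
    · rw [if_pos hb]
      symm
      rw [List.any_eq_true] at hb ⊢
      obtain ⟨f, hf, h⟩ := hb
      exact ⟨f, hf, by simpa using ((List.isPrefixOf_iff_prefix.1 h).isInfix)⟩
    · rw [if_neg hb, ih]
      rw [Bool.eq_iff_iff]
      simp only [List.any_eq_true, decide_eq_true_eq]
      have hnp : ∀ f ∈ fs, ¬ f.toList <+: (ch :: rest) := by
        intro f hf hp
        exact hb (List.any_eq_true.2 ⟨f, hf, List.isPrefixOf_iff_prefix.2 hp⟩)
      constructor
      · rintro ⟨f, hf, h⟩
        exact ⟨f, hf, List.infix_cons_iff.2 (Or.inr h)⟩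
      · rintro ⟨f, hf, h⟩
        rcases List.infix_cons_iff.1 h with hp | hi
        · exact absurd hp (hnp f hf)
        · exact ⟨f, hf, hi⟩

-- every produced filter string is non-empty: upper preserves length, strip p ≠ ""
theorem pvFiltros_ne (filtro : String) :
    ∀ f ∈ ((pvSplitComma filtro).filter (fun p => PySem.Str.strip p ≠ "")).map
      (fun p => pvNormalizar (PySem.Str.strip p)), f.toList ≠ [] := by
  intro f hf
  simp only [List.mem_map, List.mem_filter] at hf
  obtain ⟨p, ⟨_, hp⟩, rfl⟩ := hf
  simp only [pvNormalizar, PySem.Str.toList_upper, PySem.Chars.upper]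
  intro h
  rw [List.map_eq_nil_iff] at h
  apply of_decide_eq_true hp
  have : (PySem.Str.strip p).toList = "".toList := by simpa using h
  exact String.toList_injective this

-- ===== VERDICT (by name: the statement is the Claim_ definition above) =====
theorem aplicar_filtro_spec : Claim_equal_aplicar_filtro := by
  intro canales filtro _dom _pre
  unfold Spec_aplicar_filtro aplicar_filtro aplicar_filtro_alt
  by_cases hg : PySem.Str.strip filtro = "" ∨ PySem.Str.strip filtro = "*"
  · rw [if_pos ((pvGuard_iff filtro).2 hg), if_pos hg]
  · rw [if_neg (fun h => hg ((pvGuard_iff filtro).1 h)), if_neg hg]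
    simp only
    by_cases hf : ((pvSplitComma filtro).filter (fun p => PySem.Str.strip p ≠ "")).map
        (fun p => pvNormalizar (PySem.Str.strip p)) = []
    · rw [if_pos hf, if_pos hf]
    · rw [if_neg hf, if_neg hf]
      refine List.filter_congr (fun c _ => ?_)
      rw [pvCoincide_eq_any, pvCoincideB_eq_any _ (pvFiltros_ne filtro)]
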